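-- pv_equiv track=rewrite | github.com/IndeFan-Pvt/AttendanceRecordingTool | generate_shift.py | count_consecutive_work_windows
-- ===== SOURCE A (Python) =====
-- def count_consecutive_work_windows(shifts: list[str], work_symbols: set[str], window_size: int) -> int:
--     if window_size <= 0 or len(shifts) < window_size:
--         return 0
--     total = 0
--     for start in range(len(shifts) - window_size + 1):
--         if all(shift in work_symbols for shift in shifts[start : start + window_size]):
--             total += 1
--     return total
-- ===== SOURCE B (Python) =====
-- def count_consecutive_work_windows(shifts: list[str], work_symbols: set[str], window_size: int) -> int:
--     if window_size <= 0:
--         return 0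
--     total = 0
--     run = 0
--     for shift in shifts:
--         if shift in work_symbols:
--             run += 1
--             if run >= window_size:
--                 total += 1
--         else:
--             run = 0
--     return total
-- ===== Notes on version B (the rewrite author's own statement) =====
-- stated objective: faster
-- what changed: Replaced the per-start rescan of each length-k window with a single pass that tracks the current run of consecutive work symbols and counts one window per position whose run reaches window_size.
import Mathlib
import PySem

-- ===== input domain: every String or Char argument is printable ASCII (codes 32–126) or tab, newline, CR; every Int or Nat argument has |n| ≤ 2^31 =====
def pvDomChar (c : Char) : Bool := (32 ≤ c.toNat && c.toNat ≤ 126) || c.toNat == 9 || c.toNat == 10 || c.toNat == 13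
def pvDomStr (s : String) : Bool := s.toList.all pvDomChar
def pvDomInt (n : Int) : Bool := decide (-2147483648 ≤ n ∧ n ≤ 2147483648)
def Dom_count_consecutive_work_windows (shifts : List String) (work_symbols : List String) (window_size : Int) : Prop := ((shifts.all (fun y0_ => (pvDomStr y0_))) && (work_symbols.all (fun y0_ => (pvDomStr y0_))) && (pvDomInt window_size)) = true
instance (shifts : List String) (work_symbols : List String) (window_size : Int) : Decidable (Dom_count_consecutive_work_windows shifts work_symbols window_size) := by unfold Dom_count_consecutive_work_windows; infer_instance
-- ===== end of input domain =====

-- B replaces A's per-start rescan of every length-k window by a single pass over the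
-- shifts that tracks the current run of consecutive work symbols (objective: faster).

-- ===== PORT A =====
def count_consecutive_work_windows (shifts : List String) (work_symbols : List String) (window_size : Int) : Int :=
  if window_size ≤ 0 ∨ (shifts.length : Int) < window_size then 0
  else
    (PySem.List.pyRange 0 ((shifts.length : Int) - window_size + 1) 1).foldl
      (fun total start =>
        if (PySem.List.slice shifts (some start) (some (start + window_size))).all
            (fun shift => PySem.Set.contains work_symbols shift)
        then total + 1 else total) 0

-- ===== PORT B =====
def count_consecutive_work_windows_alt (shifts : List String) (work_symbols : List String) (window_size : Int) : Int :=
  if window_size ≤ 0 then 0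
  else
    (shifts.foldl
      (fun (st : Int × Int) shift =>
        if PySem.Set.contains work_symbols shift then
          ((if st.2 + 1 ≥ window_size then st.1 + 1 else st.1), st.2 + 1)
        else (st.1, 0))
      (0, 0)).1

-- ===== PRECONDITION & SPEC =====
def Spec_count_consecutive_work_windows (shifts : List String) (work_symbols : List String) (window_size : Int) (out : Int) : Prop := out = count_consecutive_work_windows_alt shifts work_symbols window_size
instance (shifts : List String) (work_symbols : List String) (window_size : Int) (out : Int) : Decidable (Spec_count_consecutive_work_windows shifts work_symbols window_size out) := by unfold Spec_count_consecutive_work_windows; infer_instance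

-- ===== CLAIM (what is proved, stated in full; the proofs are below) =====
def Claim_equal_count_consecutive_work_windows : Prop := ∀ (shifts : List String) (work_symbols : List String) (window_size : Int), Dom_count_consecutive_work_windows shifts work_symbols window_size → Spec_count_consecutive_work_windows shifts work_symbols window_size (count_consecutive_work_windows shifts work_symbols window_size)

-- ===== LEMMAS AND PROOFS =====

-- Number of all-work length-kn windows of bs (A's quantity, over the boolean work mask).
def pvCountA (kn : Nat) (bs : List Bool) : Nat :=
  (List.range (bs.length + 1 - kn)).countP (fun i => ((bs.drop i).take kn).all id)

-- B's single-pass count, with r = length of the run of trues immediately before bs.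
def pvCountB (kn : Nat) : List Bool → Nat → Nat
  | [], _ => 0
  | true :: bs, r => (if kn ≤ r + 1 then 1 else 0) + pvCountB kn bs (r + 1)
  | false :: bs, _ => pvCountB kn bs 0

lemma pvHeadA (kn : Nat) (b : Bool) (bs : List Bool) :
    pvCountA kn (b :: bs) =
      (if kn ≤ bs.length + 1 ∧ ((b :: bs).take kn).all id = true then 1 else 0) + pvCountA kn bs := by
  unfold pvCountA
  by_cases h : kn ≤ bs.length + 1
  · have h1 : (b :: bs).length + 1 - kn = (bs.length + 1 - kn) + 1 := by
      simp only [List.length_cons]; omega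
    rw [h1, List.range_succ_eq_map, List.countP_cons, List.countP_map]
    simp only [Function.comp_def, List.drop_succ_cons, List.drop_zero, h, true_and]
    split_ifs <;> omega
  · have h1 : bs.length + 1 + 1 - kn = 0 := by omega
    have h2 : bs.length + 1 - kn = 0 := by omega
    simp [List.length_cons, h1, h2, h]

lemma pvAllTakeRep (kn r : Nat) : ((List.replicate r true).take kn).all id = true := by
  simp [List.take_replicate]

lemma pvRepA (kn : Nat) (r : Nat) :
    pvCountA kn (List.replicate r true) = r + 1 - kn := by
  induction r with
  | zero =>
      unfold pvCountA
      simp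
  | succ r ih =>
      rw [List.replicate_succ, pvHeadA kn, ih]
      rw [show ((true :: List.replicate r true).take kn) = (List.replicate (r + 1) (true : Bool)).take kn from by
        rw [List.replicate_succ]]
      rw [pvAllTakeRep kn (r + 1)]
      simp only [List.length_replicate, and_true]
      split_ifs <;> omega

lemma pvFalseA (kn : Nat) (hk : 1 ≤ kn) (ys : List Bool) :
    ∀ r, pvCountA kn (List.replicate r true ++ false :: ys) = (r + 1 - kn) + pvCountA kn ys := by
  intro r
  induction r with
  | zero =>
      obtain ⟨m, rfl⟩ : ∃ m, kn = m + 1 := ⟨kn - 1, by omega⟩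
      rw [List.replicate_zero, List.nil_append, pvHeadA]
      simp
  | succ r ih =>
      have hl : List.replicate (r + 1) true ++ false :: ys
          = true :: (List.replicate r true ++ false :: ys) := by
        rw [List.replicate_succ, List.cons_append]
      rw [hl, pvHeadA, ih]
      have hrw : ((true :: (List.replicate r true ++ false :: ys)).take kn).all id
          = decide (kn ≤ r + 1) := by
        rw [← hl]
        by_cases hc : kn ≤ r + 1
        · rw [List.take_append_of_le_length (by simp only [List.length_replicate]; omega)]
          simp [List.take_replicate, hc]
        · rw [List.take_append]
          have hx : kn - (List.replicate (r + 1) (true : Bool)).length = (kn - (r + 1) - 1) + 1 := by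
            simp only [List.length_replicate]; omega
          rw [hx, List.take_succ_cons]
          simp [hc]
      rw [hrw]
      simp only [List.length_append, List.length_replicate, List.length_cons,
        decide_eq_true_eq]
      split_ifs <;> omega

lemma pvBA (kn : Nat) (hk : 1 ≤ kn) (bs : List Bool) :
    ∀ r, pvCountB kn bs r + (r + 1 - kn) = pvCountA kn (List.replicate r true ++ bs) := by
  induction bs with
  | nil =>
      intro r
      simp [pvCountB, pvRepA kn]
  | cons b bs ih =>
      intro r
      cases b with
      | false =>
          have h0 := ih 0
          simp only [List.replicate_zero, List.nil_append] at h0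
          rw [show pvCountB kn (false :: bs) r = pvCountB kn bs 0 from rfl]
          rw [pvFalseA kn hk bs r]
          omega
      | true =>
          have h1 := ih (r + 1)
          have hl : List.replicate r true ++ true :: bs = List.replicate (r + 1) true ++ bs := by
            rw [List.replicate_succ', List.append_assoc, List.singleton_append]
          rw [show pvCountB kn (true :: bs) r
              = (if kn ≤ r + 1 then 1 else 0) + pvCountB kn bs (r + 1) from rfl, hl, ← h1]
          split_ifs <;> omega

lemma pvBA0 (kn : Nat) (hk : 1 ≤ kn) (bs : List Bool) :
    pvCountB kn bs 0 = pvCountA kn bs := by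
  have h := pvBA kn hk bs 0
  simp only [List.replicate_zero, List.nil_append] at h
  omega

lemma pvAchar (shifts work_symbols : List String) (k : Int) (hk : ¬ k ≤ 0) :
    count_consecutive_work_windows shifts work_symbols k
      = ((pvCountA k.toNat (shifts.map (fun s => PySem.Set.contains work_symbols s)) : Nat) : Int) := by
  have hkc : ((k.toNat : Nat) : Int) = k := Int.toNat_of_nonneg (by omega)
  by_cases h2 : (shifts.length : Int) < k
  · unfold count_consecutive_work_windows
    rw [if_pos (Or.inr h2)]
    have h0 : shifts.length + 1 - k.toNat = 0 := by omega
    unfold pvCountA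
    simp [List.length_map, h0]
  · unfold count_consecutive_work_windows
    rw [if_neg (fun h => h.elim hk h2)]
    have hb : (shifts.length : Int) - k + 1 = ((shifts.length + 1 - k.toNat : Nat) : Int) := by omega
    rw [hb, PySem.List.foldl_count_if, PySem.List.pyRange_zero_natCast, List.countP_map]
    have hp : ((fun (start : Int) =>
          (PySem.List.slice shifts (some start) (some (start + k))).all
            (fun shift => PySem.Set.contains work_symbols shift)) ∘ (fun (i : Nat) => (i : Int)))
        = fun (i : Nat) =>
            (((shifts.map (fun s => PySem.Set.contains work_symbols s)).drop i).take k.toNat).all id := by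
      funext i
      simp only [Function.comp_apply]
      rw [← hkc, PySem.List.slice_natCast_add]
      rw [← List.map_drop, ← List.map_take, List.all_map]
      rfl
    rw [hp]
    unfold pvCountA
    simp [List.length_map]

lemma pvBinv (k : Int) (kn : Nat) (hkc : (kn : Int) = k) (bs : List Bool) :
    ∀ (t : Int) (r : Nat),
      (bs.foldl (fun (st : Int × Int) b =>
          if b then ((if st.2 + 1 ≥ k then st.1 + 1 else st.1), st.2 + 1) else (st.1, 0))
        (t, (r : Int))).1 = t + (pvCountB kn bs r : Int) := by
  induction bs with
  | nil => intro t r; simp [pvCountB]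
  | cons b bs ih =>
      intro t r
      cases b with
      | false =>
          have h := ih t 0
          simp only [Nat.cast_zero] at h
          simpa [pvCountB] using h
      | true =>
          have hstep : ((true :: bs).foldl (fun (st : Int × Int) b =>
              if b then ((if st.2 + 1 ≥ k then st.1 + 1 else st.1), st.2 + 1) else (st.1, 0))
              (t, (r : Int)))
            = (bs.foldl (fun (st : Int × Int) b =>
              if b then ((if st.2 + 1 ≥ k then st.1 + 1 else st.1), st.2 + 1) else (st.1, 0))
              ((if (r : Int) + 1 ≥ k then t + 1 else t), (r : Int) + 1)) := rfl
          rw [hstep]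
          have hcast : (r : Int) + 1 = ((r + 1 : Nat) : Int) := by push_cast; ring
          by_cases hc : kn ≤ r + 1
          · have hc' : (r : Int) + 1 ≥ k := by omega
            rw [if_pos hc', hcast, ih (t + 1) (r + 1)]
            simp only [pvCountB, if_pos hc]
            push_cast
            ring
          · have hc' : ¬ ((r : Int) + 1 ≥ k) := by omega
            rw [if_neg hc', hcast, ih t (r + 1)]
            simp only [pvCountB, if_neg hc]
            push_cast
            ring

lemma pvBchar (shifts work_symbols : List String) (k : Int) (hk : ¬ k ≤ 0) :
    count_consecutive_work_windows_alt shifts work_symbols k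
      = ((pvCountB k.toNat (shifts.map (fun s => PySem.Set.contains work_symbols s)) 0 : Nat) : Int) := by
  unfold count_consecutive_work_windows_alt
  rw [if_neg hk]
  have hkc : ((k.toNat : Nat) : Int) = k := Int.toNat_of_nonneg (by omega)
  have h := pvBinv k k.toNat hkc (shifts.map (fun s => PySem.Set.contains work_symbols s)) 0 0
  rw [List.foldl_map] at h
  simpa using h

-- ===== VERDICT (by name: the statement is the Claim_ definition above) =====
theorem count_consecutive_work_windows_spec : Claim_equal_count_consecutive_work_windows := by
  intro shifts work_symbols k _
  unfold Spec_count_consecutive_work_windows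
  by_cases hk : k ≤ 0
  · unfold count_consecutive_work_windows count_consecutive_work_windows_alt
    rw [if_pos (Or.inl hk), if_pos hk]
  · rw [pvAchar shifts work_symbols k hk, pvBchar shifts work_symbols k hk,
      pvBA0 k.toNat (by omega) (shifts.map (fun s => PySem.Set.contains work_symbols s))]
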